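-- pv_equiv track=rewrite | github.com/ucsc-redwood/better-together | scripts-v2/parse-pipe-bm/try.py | get_all_possible_chunks
-- ===== SOURCE A (Python) =====
-- from typing import List, Tuple, Dict, Optional
--
-- def get_all_possible_chunks(
--     num_stages: int, max_chunks: int
-- ) -> List[List[Tuple[int, int]]]:
--     """Generate all possible ways to divide stages into continuous chunks"""
--
--     def generate_partitions(n, max_parts):
--         # Generate all ways to partition n elements into at most max_parts parts
--         if n <= 0 or max_parts <= 0:
--             return []
--         if max_parts == 1:
--             return [[n]]
--
--         result = []
--         for i in range(1, n + 1):
--             for p in generate_partitions(n - i, max_parts - 1):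
--                 result.append([i] + p)
--
--         # Also include the case where we use fewer than max_parts
--         if max_parts > 1:
--             result.extend(generate_partitions(n, max_parts - 1))
--
--         return result
--
--     # Get all partitions of the stages
--     partitions = generate_partitions(num_stages, max_chunks)
--
--     # Convert partitions to chunks with start-end indices
--     all_chunks = []
--     for partition in partitions:
--         chunks = []
--         start_idx = 1  # Stages are 1-indexed
--
--         for part_size in partition:
--             end_idx = start_idx + part_size - 1
--             chunks.append((start_idx, end_idx))
--             start_idx = end_idx + 1
--
--         # Only keep valid partitions (those that use all stages)
--         if start_idx > num_stages:
--             all_chunks.append(chunks)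
--
--     return all_chunks
-- ===== SOURCE B (Python) =====
-- def get_all_possible_chunks(num_stages, max_chunks):
--     """Generate all possible ways to divide stages into continuous chunks.
--
--     Iterative depth-first traversal with an explicit work stack: each frame
--     (remaining, parts, start, prefix) either emits prefix plus the single
--     closing chunk (parts == 1) or schedules its sub-frames; chunk (start, end)
--     tuples are produced directly, with no intermediate integer partitions,
--     no conversion pass, no filter and no recursion."""
--     out = []
--     stack = [(num_stages, max_chunks, 1, [])]
--     while stack:
--         rem, parts, start, prefix = stack.pop()
--         if rem <= 0 or parts <= 0:
--             continue
--         if parts == 1: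
--             out.append(prefix + [(start, start + rem - 1)])
--             continue
--         # scheduled last, explored after every split of the first chunk:
--         # the same stage count with fewer parts
--         stack.append((rem, parts - 1, start, prefix))
--         # first chunk takes i stages; pushed in reverse so i = 1 comes first
--         for i in range(rem, 0, -1):
--             stack.append((rem - i, parts - 1, start + i,
--                           prefix + [(start, start + i - 1)]))
--     return out
-- ===== Notes on version B (the rewrite author's own statement) =====
-- stated objective: alternative
-- what changed: B replaces A's top-down recursive generation of integer partitions plus separate chunk-conversion and (always-true) filter passes with a single iterative depth-first traversal over an explicit work stack that emits the (start,end) chunk lists directly: no recursion, no intermediate integer partitions, no conversion pass, no filter.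
import Mathlib
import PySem

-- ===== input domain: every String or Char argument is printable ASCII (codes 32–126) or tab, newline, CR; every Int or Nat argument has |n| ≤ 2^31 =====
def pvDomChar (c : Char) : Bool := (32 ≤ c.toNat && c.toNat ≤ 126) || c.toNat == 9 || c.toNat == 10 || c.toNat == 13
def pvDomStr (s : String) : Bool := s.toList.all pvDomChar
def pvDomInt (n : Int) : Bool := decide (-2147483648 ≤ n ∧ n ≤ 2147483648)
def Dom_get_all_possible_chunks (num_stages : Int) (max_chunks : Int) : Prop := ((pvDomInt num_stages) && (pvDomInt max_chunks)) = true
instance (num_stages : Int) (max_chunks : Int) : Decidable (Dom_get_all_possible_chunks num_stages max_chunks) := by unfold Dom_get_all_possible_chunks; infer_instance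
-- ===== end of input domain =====

-- B replaces A's recursion over integer partitions (plus a conversion pass and an
-- always-true filter) with an iterative explicit-stack traversal that emits the
-- (start, end) chunk lists directly: an alternative, recursion-free algorithm.

-- ===== PORT A =====
-- inner helper generate_partitions of A
def pvGenPartitions (n : Int) (max_parts : Int) : List (List Int) :=
  if n ≤ 0 ∨ max_parts ≤ 0 then []
  else if max_parts = 1 then [[n]]
  else
    let result :=
      (PySem.List.pyRange 1 (n + 1) 1).foldl
        (fun result i =>
          (pvGenPartitions (n - i) (max_parts - 1)).foldl
            (fun result p => result ++ [i :: p]) result) []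
    let result := if 1 < max_parts then result ++ pvGenPartitions n (max_parts - 1) else result
    result
termination_by max_parts.toNat
decreasing_by all_goals omega

def get_all_possible_chunks (num_stages : Int) (max_chunks : Int) : List (List (Int × Int)) :=
  let partitions := pvGenPartitions num_stages max_chunks
  partitions.foldl
    (fun all_chunks partition =>
      let st :=
        partition.foldl
          (fun (st : List (Int × Int) × Int) part_size =>
            (st.1 ++ [(st.2, st.2 + part_size - 1)], st.2 + part_size))
          ([], (1 : Int))
      if num_stages < st.2 then all_chunks ++ [st.1] else all_chunks)
    []

-- ===== PORT B =====
-- a work-stack frame (remaining, parts, start, prefix); Python's stack.pop()/append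
-- at the END of the list become head operations here (head = top of stack).
-- pvMu/pvM: a bound on the loop's remaining work, used only as structural fuel
-- (a totality guard: the proofs below show it is never exhausted)
def pvMu (f : Int × Int × Int × List (Int × Int)) : Nat := (f.1.toNat + 2) ^ f.2.1.toNat
def pvM (stack : List (Int × Int × Int × List (Int × Int))) : Nat := (stack.map pvMu).sum

-- the main loop of B: pop a frame, emit or expand it
def pvLoop (fuel : Nat) (stack : List (Int × Int × Int × List (Int × Int)))
    (out : List (List (Int × Int))) : List (List (Int × Int)) :=
  match fuel, stack with
  | _, [] => out
  | 0, _ => out  -- fuel exhausted: never reached when pvM stack ≤ fuel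
  | fuel + 1, (rem, parts, start, pref) :: rest =>
    if rem ≤ 0 ∨ parts ≤ 0 then pvLoop fuel rest out
    else if parts = 1 then pvLoop fuel rest (out ++ [pref ++ [(start, start + rem - 1)]])
    else pvLoop fuel
      ((PySem.List.pyRange rem 0 (-1)).foldl
        (fun st i => (rem - i, parts - 1, start + i, pref ++ [(start, start + i - 1)]) :: st)
        ((rem, parts - 1, start, pref) :: rest)) out

def get_all_possible_chunks_alt (num_stages : Int) (max_chunks : Int) : List (List (Int × Int)) :=
  pvLoop (pvM [(num_stages, max_chunks, 1, [])]) [(num_stages, max_chunks, 1, [])] []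

-- ===== PRECONDITION & SPEC =====
-- Pre_ excludes exactly the inputs (num_stages ≥ 1 and max_chunks ≥ 9998) on which the
-- Python A raises RecursionError: its fewer-parts branch recurses max_chunks deep, and
-- 9997 is the measured last returning depth under the evaluation interpreter's recursion
-- limit; for num_stages ≤ 0 the recursion stops immediately and A returns [] for any max_chunks.
def Pre_get_all_possible_chunks (num_stages : Int) (max_chunks : Int) : Prop :=
  num_stages ≤ 0 ∨ max_chunks ≤ 9997
instance (num_stages : Int) (max_chunks : Int) : Decidable (Pre_get_all_possible_chunks num_stages max_chunks) := by unfold Pre_get_all_possible_chunks; infer_instance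

def pvWitness_get_all_possible_chunks : Int × Int := (3, 3)

def Spec_get_all_possible_chunks (num_stages : Int) (max_chunks : Int) (out : List (List (Int × Int))) : Prop := out = get_all_possible_chunks_alt num_stages max_chunks
instance (num_stages : Int) (max_chunks : Int) (out : List (List (Int × Int))) : Decidable (Spec_get_all_possible_chunks num_stages max_chunks out) := by unfold Spec_get_all_possible_chunks; infer_instance

-- ===== CLAIM =====
def Claim_equal_get_all_possible_chunks : Prop := ∀ (num_stages : Int) (max_chunks : Int), Dom_get_all_possible_chunks num_stages max_chunks → Pre_get_all_possible_chunks num_stages max_chunks → Spec_get_all_possible_chunks num_stages max_chunks (get_all_possible_chunks num_stages max_chunks)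

-- ===== LEMMAS AND PROOFS =====

-- the measure of a stack built by consing mapped elements
theorem pvMFoldCons (l : List Int) (g : Int → Int × Int × Int × List (Int × Int))
    (init : List (Int × Int × Int × List (Int × Int))) :
    pvM (l.foldl (fun st i => g i :: st) init) = (l.map (fun i => pvMu (g i))).sum + pvM init := by
  induction l generalizing init with
  | nil => simp
  | cons a l ih =>
    rw [List.foldl_cons, ih]
    simp [pvM]
    omega

-- popping a frame strictly decreases the stack measure
theorem pvPopDecr (f : Int × Int × Int × List (Int × Int))
    (rest : List (Int × Int × Int × List (Int × Int))) : pvM rest < pvM (f :: rest) := by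
  have h1 : 1 ≤ pvMu f := Nat.one_le_pow _ _ (by omega)
  simp only [pvM, List.map_cons, List.sum_cons]
  omega

-- pushing a frame's sub-frames strictly decreases the stack measure
theorem pvPushDecr (rem parts start : Int) (pref : List (Int × Int))
    (rest : List (Int × Int × Int × List (Int × Int)))
    (h1 : ¬ (rem ≤ 0 ∨ parts ≤ 0)) (h2 : ¬ parts = 1) :
    pvM ((PySem.List.pyRange rem 0 (-1)).foldl
          (fun st i => (rem - i, parts - 1, start + i, pref ++ [(start, start + i - 1)]) :: st)
          ((rem, parts - 1, start, pref) :: rest))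
      < pvM ((rem, parts, start, pref) :: rest) := by
  rw [pvMFoldCons]
  have hR : 1 ≤ rem.toNat := by omega
  have hP : 2 ≤ parts.toNat := by omega
  have hexp : (parts - 1).toNat = parts.toNat - 1 := by omega
  set R := rem.toNat with hRdef
  set P := parts.toNat with hPdef
  have hsum : ((PySem.List.pyRange rem 0 (-1)).map
      (fun i => pvMu (rem - i, parts - 1, start + i, pref ++ [(start, start + i - 1)]))).sum
      ≤ R * (R + 1) ^ (P - 1) := by
    have hb : ∀ x ∈ (PySem.List.pyRange rem 0 (-1)).map
        (fun i => pvMu (rem - i, parts - 1, start + i, pref ++ [(start, start + i - 1)])),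
        x ≤ (R + 1) ^ (P - 1) := by
      intro x hx
      rcases List.mem_map.mp hx with ⟨i, hi, rfl⟩
      have hib : 0 < i ∧ i ≤ rem := (PySem.List.mem_pyRange_neg_one).mp hi
      show ((rem - i).toNat + 2) ^ (parts - 1).toNat ≤ (R + 1) ^ (P - 1)
      rw [hexp]
      exact Nat.pow_le_pow_left (by omega) _
    have hcard := List.sum_le_card_nsmul _ _ hb
    simp only [List.length_map, smul_eq_mul] at hcard
    have hlen : (PySem.List.pyRange rem 0 (-1)).length = R := by
      rw [PySem.List.length_pyRange_neg_one]
      omega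
    rw [hlen] at hcard
    exact hcard
  have hmu1 : pvMu (rem, parts - 1, start, pref) = (R + 2) ^ (P - 1) := by
    show (rem.toNat + 2) ^ (parts - 1).toNat = (R + 2) ^ (P - 1)
    rw [hexp]
  have hmu0 : pvMu (rem, parts, start, pref) = (R + 2) ^ P := rfl
  have hX : (R + 1) ^ (P - 1) ≤ (R + 2) ^ (P - 1) := Nat.pow_le_pow_left (by omega) _
  have h5 : R * (R + 1) ^ (P - 1) ≤ R * (R + 2) ^ (P - 1) := Nat.mul_le_mul_left _ hX
  have h3 : (R + 2) ^ P = (R + 2) * (R + 2) ^ (P - 1) := by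
    conv_lhs => rw [show P = (P - 1) + 1 from by omega]
    rw [pow_succ']
  have h6 : (R + 2) * (R + 2) ^ (P - 1) = (R + 1) * (R + 2) ^ (P - 1) + (R + 2) ^ (P - 1) := by
    ring
  have h7 : R * (R + 2) ^ (P - 1) < (R + 1) * (R + 2) ^ (P - 1) :=
    Nat.mul_lt_mul_of_lt_of_le (by omega) le_rfl (by positivity)
  simp only [pvM, List.map_cons, List.sum_cons, hmu1, hmu0]
  linarith

-- chunk conversion of one partition starting at stage s (A computes it by a fold)
def pvConv : List Int → Int → List (Int × Int)
  | [], _ => []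
  | x :: xs, s => (s, s + x - 1) :: pvConv xs (s + x)

-- recursive denotation of one stack frame: what B's loop emits for it
def pvGo (remaining : Int) (parts : Int) (start : Int) (pref : List (Int × Int)) :
    List (List (Int × Int)) :=
  if remaining ≤ 0 ∨ parts ≤ 0 then []
  else if parts = 1 then [pref ++ [(start, start + remaining - 1)]]
  else
    ((PySem.List.pyRange 1 (remaining + 1) 1).foldl
      (fun out i =>
        out ++ pvGo (remaining - i) (parts - 1) (start + i)
          (pref ++ [(start, start + i - 1)])) [])
    ++ pvGo remaining (parts - 1) start pref
termination_by parts.toNat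
decreasing_by all_goals omega

def pvEval (f : Int × Int × Int × List (Int × Int)) : List (List (Int × Int)) :=
  pvGo f.1 f.2.1 f.2.2.1 f.2.2.2

-- A's inner fold computes (pvConv, s + sum)
theorem pvFoldConv (p : List Int) (cs : List (Int × Int)) (s : Int) :
    p.foldl
      (fun (st : List (Int × Int) × Int) part_size =>
        (st.1 ++ [(st.2, st.2 + part_size - 1)], st.2 + part_size)) (cs, s)
      = (cs ++ pvConv p s, s + p.sum) := by
  induction p generalizing cs s with
  | nil => simp [pvConv]
  | cons x xs ih =>
    simp only [List.foldl_cons, ih, pvConv, List.sum_cons]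
    refine Prod.ext ?_ ?_
    · simp
    · simp; ring

-- membership in a fold that only appends
theorem pvMemFoldAppend {α β : Type} (rng : List α) (X : α → List β) (acc : List β) (q : β) :
    q ∈ rng.foldl (fun acc i => acc ++ X i) acc ↔ q ∈ acc ∨ ∃ i ∈ rng, q ∈ X i := by
  induction rng generalizing acc with
  | nil => simp
  | cons a l ih =>
    simp only [List.foldl_cons]
    rw [ih]
    simp [List.mem_append]
    tauto

theorem pvMapFoldAppend {α β γ : Type} (f : β → γ) (rng : List α) (g : α → List β)
    (acc : List β) :
    (rng.foldl (fun acc i => acc ++ g i) acc).map f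
      = rng.foldl (fun out i => out ++ (g i).map f) (acc.map f) := by
  induction rng generalizing acc with
  | nil => rfl
  | cons a l ih =>
    simp only [List.foldl_cons]
    rw [ih, List.map_append]

theorem pvFoldlCongrFun {α β : Type} (l : List α) (f g : β → α → β) (a : β)
    (h : ∀ b x, f b x = g b x) : l.foldl f a = l.foldl g a := by
  have : f = g := funext fun b => funext fun x => h b x
  rw [this]

-- every partition produced sums to n
theorem pvGenSum (k : Nat) : ∀ (n m : Int), m.toNat ≤ k →
    ∀ p ∈ pvGenPartitions n m, p.sum = n := by
  induction k with
  | zero =>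
    intro n m hm p hp
    rw [pvGenPartitions] at hp
    have : m ≤ 0 := by omega
    simp [this] at hp
  | succ k ih =>
    intro n m hm p hp
    rw [pvGenPartitions] at hp
    by_cases hg : n ≤ 0 ∨ m ≤ 0
    · simp [hg] at hp
    · simp only [if_neg hg] at hp
      by_cases h1 : m = 1
      · simp [h1] at hp
        simp [hp]
      · simp only [if_neg h1] at hp
        have hm2 : 1 < m := by omega
        simp only [if_pos hm2, List.mem_append] at hp
        rcases hp with hp | hp
        · have hp' := hp
          rw [show (fun (result : List (List Int)) i =>
              (pvGenPartitions (n - i) (m - 1)).foldl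
                (fun result p => result ++ [i :: p]) result)
            = (fun result i => result ++ (pvGenPartitions (n - i) (m - 1)).map (i :: ·))
            from funext fun r => funext fun i =>
              PySem.List.foldl_append_singleton_eq_map _ _ _] at hp'
          rw [pvMemFoldAppend] at hp'
          rcases hp' with h | ⟨i, _, hpi⟩
          · simp at h
          · rcases List.mem_map.mp hpi with ⟨q, hq, rfl⟩
            have := ih (n - i) (m - 1) (by omega) q hq
            simp [this]
        · exact ih n (m - 1) (by omega) p hp

-- B's denotation equals map-of-conversion over A's partitions
theorem pvGoEq (k : Nat) : ∀ (n m s : Int) (pre : List (Int × Int)), m.toNat ≤ k →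
    pvGo n m s pre = (pvGenPartitions n m).map (fun p => pre ++ pvConv p s) := by
  induction k with
  | zero =>
    intro n m s pre hm
    have : m ≤ 0 := by omega
    rw [pvGo, pvGenPartitions]
    simp [this]
  | succ k ih =>
    intro n m s pre hm
    rw [pvGo, pvGenPartitions]
    by_cases hg : n ≤ 0 ∨ m ≤ 0
    · simp [hg]
    · simp only [if_neg hg]
      by_cases h1 : m = 1
      · simp [h1, pvConv]
      · simp only [if_neg h1]
        have hm2 : 1 < m := by omega
        simp only [if_pos hm2]
        rw [List.map_append]
        congr 1
        · rw [show (fun (result : List (List Int)) i =>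
              (pvGenPartitions (n - i) (m - 1)).foldl
                (fun result p => result ++ [i :: p]) result)
            = (fun result i => result ++ (pvGenPartitions (n - i) (m - 1)).map (i :: ·))
            from funext fun r => funext fun i =>
              PySem.List.foldl_append_singleton_eq_map _ _ _]
          rw [pvMapFoldAppend]
          simp only [List.map_nil]
          apply pvFoldlCongrFun
          intro acc i
          congr 1
          rw [ih (n - i) (m - 1) (s + i) (pre ++ [(s, s + i - 1)]) (by omega),
              List.map_map]
          apply List.map_congr_left
          intro p _
          simp [Function.comp, pvConv]
        · exact ih n (m - 1) s pre (by omega)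

-- a stack built by consing mapped elements, as a list
theorem pvFoldConsEq {α β : Type} (l : List α) (g : α → β) (init : List β) :
    l.foldl (fun st i => g i :: st) init = (l.map g).reverse ++ init := by
  induction l generalizing init with
  | nil => simp
  | cons a l ih =>
    rw [List.foldl_cons, ih]
    simp

-- B's loop emits the denotations of the stacked frames in order (the fuel bound
-- pvM stack is never exhausted)
theorem pvLoopEq (fuel : Nat) : ∀ (stack : List (Int × Int × Int × List (Int × Int)))
    (out : List (List (Int × Int))), pvM stack ≤ fuel →
    pvLoop fuel stack out = out ++ (stack.map pvEval).flatten := by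
  induction fuel with
  | zero =>
    intro stack out hf
    match stack with
    | [] => simp [pvLoop]
    | f :: rest =>
      exact absurd hf (by have h := pvPopDecr f rest; omega)
  | succ fuel ih =>
    intro stack out hf
    match stack with
    | [] => simp [pvLoop]
    | (rem, parts, start, pref) :: rest =>
      rw [pvLoop]
      by_cases h1 : rem ≤ 0 ∨ parts ≤ 0
      · rw [if_pos h1, ih rest out (by have := pvPopDecr (rem, parts, start, pref) rest; omega)]
        have he : pvEval (rem, parts, start, pref) = [] := by
          show pvGo rem parts start pref = []
          rw [pvGo, if_pos h1]
        simp [he]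
      · rw [if_neg h1]
        by_cases h2 : parts = 1
        · rw [if_pos h2, ih rest _ (by have := pvPopDecr (rem, parts, start, pref) rest; omega)]
          have he : pvEval (rem, parts, start, pref) = [pref ++ [(start, start + rem - 1)]] := by
            show pvGo rem parts start pref = _
            rw [pvGo, if_neg h1, if_pos h2]
          simp [he]
        · rw [if_neg h2,
            ih _ out (by have := pvPushDecr rem parts start pref rest h1 h2; omega)]
          rw [pvFoldConsEq]
          have hrev : ((PySem.List.pyRange rem 0 (-1)).map
              (fun i => ((rem - i, parts - 1, start + i, pref ++ [(start, start + i - 1)]) :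
                Int × Int × Int × List (Int × Int)))).reverse
              = (PySem.List.pyRange 1 (rem + 1) 1).map
                  (fun i => (rem - i, parts - 1, start + i, pref ++ [(start, start + i - 1)])) := by
            rw [PySem.List.pyRange_neg_one_eq_reverse]
            rw [List.map_reverse, List.reverse_reverse]
            norm_num
          rw [hrev]
          have hgo : pvEval (rem, parts, start, pref)
              = ((PySem.List.pyRange 1 (rem + 1) 1).map
                  (fun i => pvEval (rem - i, parts - 1, start + i, pref ++ [(start, start + i - 1)]))).flatten
                ++ pvEval (rem, parts - 1, start, pref) := by
            show pvGo rem parts start pref = _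
            rw [pvGo, if_neg h1, if_neg h2]
            congr 1
            rw [PySem.List.foldl_append_eq_flatMap]
            simp [List.flatMap_def, pvEval]
          simp only [List.map_append, List.map_map, List.map_cons, List.flatten_append,
            List.flatten_cons, hgo]
          simp [Function.comp_def, pvEval]

-- ===== VERDICT (by name: the statement is the Claim_ definition above) =====
theorem get_all_possible_chunks_spec : Claim_equal_get_all_possible_chunks := by
  intro n m _ _
  unfold Spec_get_all_possible_chunks get_all_possible_chunks get_all_possible_chunks_alt
  dsimp only
  rw [pvLoopEq _ _ _ le_rfl]
  have halt : ([] : List (List (Int × Int))) ++ ([(n, m, 1, ([] : List (Int × Int)))].map pvEval).flatten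
      = pvGo n m 1 [] := by
    simp [pvEval]
  rw [halt]
  rw [pvGoEq m.toNat n m 1 [] le_rfl]
  have key : ∀ (L : List (List Int)), (∀ p ∈ L, p.sum = n) →
      ∀ acc : List (List (Int × Int)),
      L.foldl (fun all_chunks partition =>
          if n < 1 + partition.sum then all_chunks ++ [[] ++ pvConv partition 1]
          else all_chunks) acc
      = acc ++ L.map (fun p => [] ++ pvConv p 1) := by
    intro L
    induction L with
    | nil => intro _ acc; simp
    | cons p l ih =>
      intro h acc
      have hp : p.sum = n := h p (by simp)
      rw [List.foldl_cons, if_pos (by rw [hp]; omega : n < 1 + p.sum),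
        ih (fun q hq => h q (List.mem_cons_of_mem _ hq))]
      simp
  simp only [pvFoldConv]
  rw [key _ (pvGenSum m.toNat n m le_rfl) []]
  simp
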